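-- pv_equiv track=rewrite | github.com/Lumilei/CPM | src/CoPM.py | attribute_count
-- ===== SOURCE A (Python) =====
-- def attribute_count(data, min_sup):
--     node_id = set()
--     item_count_dict = {}
--     for item in data:
--         node_id.add(item[0])
--         if item[1] not in item_count_dict:
--             item_count_dict[item[1]] = 1
--         else:
--             item_count_dict[item[1]] += 1
--     key = item_count_dict.keys()
--     data_set = []
--     for item in data:
--         if item[1] in key and item_count_dict[item[1]] < min_sup:
--             del item_count_dict[item[1]]
--     key = item_count_dict.keys()
--     for item in data:
--         if item[1] in key:
--             data_set.append(item)
--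
--     return data_set, item_count_dict, node_id
-- ===== SOURCE B (Python) =====
-- def attribute_count(data, min_sup):
--     keys = [item[1] for item in data]
--     item_count_dict = {}
--     for k in keys:
--         if k not in item_count_dict and keys.count(k) >= min_sup:
--             item_count_dict[k] = keys.count(k)
--     data_set = [item for item in data if keys.count(item[1]) >= min_sup]
--     node_id = {item[0] for item in data}
--     return data_set, item_count_dict, node_id
-- ===== Notes on version B (the rewrite author's own statement) =====
-- stated objective: alternative
-- what changed: Replaces A's count table plus delete-during-scan pruning by a table-free strategy: each key's support is computed directly with list.count, kept keys are inserted at their first occurrence, and data is filtered by a direct count test.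
import Mathlib
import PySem

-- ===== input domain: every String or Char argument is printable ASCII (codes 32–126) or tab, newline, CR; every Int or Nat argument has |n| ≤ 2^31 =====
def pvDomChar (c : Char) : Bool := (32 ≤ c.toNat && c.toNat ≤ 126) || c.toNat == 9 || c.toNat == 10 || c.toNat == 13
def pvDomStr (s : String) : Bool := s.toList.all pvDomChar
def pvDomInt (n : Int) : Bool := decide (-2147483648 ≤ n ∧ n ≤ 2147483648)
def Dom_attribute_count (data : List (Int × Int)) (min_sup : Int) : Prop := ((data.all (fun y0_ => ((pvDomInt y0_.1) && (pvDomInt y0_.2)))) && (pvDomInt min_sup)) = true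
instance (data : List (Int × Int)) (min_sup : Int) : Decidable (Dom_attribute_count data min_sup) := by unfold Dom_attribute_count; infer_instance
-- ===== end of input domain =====

-- B drops A's count table and its delete-during-scan loop: it decides each key directly by counting its occurrences with list.count; objective: alternative (quadratic, not faster).

-- ===== PORT A =====
def attribute_count (data : List (Int × Int)) (min_sup : Int) : (List (Int × Int)) × (List (Int × Int)) × List Int :=
  -- first loop: node_id.add(item[0]); count item[1] with the if/else branch
  let st := data.foldl (fun (s : PySem.Set Int × PySem.Dict Int Int) item =>
      (PySem.Set.add s.1 item.1,
       if s.2.contains item.2 = false then s.2.insert item.2 1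
       else s.2.insert item.2 (s.2.getD item.2 0 + 1)))
    (PySem.Set.empty, PySem.Dict.empty)
  -- second loop: delete low-support keys while scanning data
  let d2 := data.foldl (fun d item =>
      if d.contains item.2 && decide (d.getD item.2 0 < min_sup) then d.erase item.2 else d) st.2
  -- third loop: append surviving items
  let data_set := data.foldl (fun acc item =>
      if d2.contains item.2 then acc ++ [item] else acc) ([] : List (Int × Int))
  (data_set, d2.items, st.1)

-- ===== PORT B =====
def attribute_count_alt (data : List (Int × Int)) (min_sup : Int) : (List (Int × Int)) × (List (Int × Int)) × List Int :=
  -- keys = [item[1] for item in data]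
  let keys := data.map (fun item => item.2)
  -- for k in keys: if k not in item_count_dict and keys.count(k) >= min_sup: item_count_dict[k] = keys.count(k)
  let item_count_dict := keys.foldl (fun (d : PySem.Dict Int Int) k =>
      if d.contains k = false && decide (min_sup ≤ (keys.count k : Int)) then d.insert k (keys.count k : Int) else d)
    PySem.Dict.empty
  -- [item for item in data if keys.count(item[1]) >= min_sup]
  let data_set := data.filter (fun item => decide (min_sup ≤ (keys.count item.2 : Int)))
  -- {item[0] for item in data}
  let node_id := PySem.Set.ofList (data.map (fun item => item.1))
  (data_set, item_count_dict.items, node_id)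

-- ===== PRECONDITION & SPEC =====
def Spec_attribute_count (data : List (Int × Int)) (min_sup : Int) (out : (List (Int × Int)) × (List (Int × Int)) × List Int) : Prop := out = attribute_count_alt data min_sup
instance (data : List (Int × Int)) (min_sup : Int) (out : (List (Int × Int)) × (List (Int × Int)) × List Int) : Decidable (Spec_attribute_count data min_sup out) := by unfold Spec_attribute_count; infer_instance

-- ===== CLAIM (what is proved, stated in full; the proofs are below) =====
def Claim_equal_attribute_count : Prop := ∀ (data : List (Int × Int)) (min_sup : Int), Dom_attribute_count data min_sup → Spec_attribute_count data min_sup (attribute_count data min_sup)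

-- ===== LEMMAS AND PROOFS =====

-- A's if/else counting step is the get-default counting step
theorem count_step_eq (d : PySem.Dict Int Int) (k : Int) :
    (if d.contains k = false then d.insert k 1 else d.insert k (d.getD k 0 + 1))
      = d.insert k (d.getD k 0 + 1) := by
  by_cases h : d.contains k = false
  · rw [if_pos h, PySem.Dict.getD_of_not_contains d (0 : Int) h, zero_add]
  · rw [if_neg h]

theorem nodup_keys_erase (d : PySem.Dict Int Int) (k : Int) (h : d.keys.Nodup) :
    (d.erase k).keys.Nodup := by
  have hs : (d.erase k).keys.Sublist d.keys := by
    simp only [PySem.Dict.keys, PySem.Dict.erase]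
    exact List.Sublist.map _ List.filter_sublist
  exact hs.nodup h

-- A's erase-during-scan loop keeps exactly the stored pairs not deleted by any scanned item
theorem erase_loop (min_sup : Int) :
    ∀ (l : List (Int × Int)) (d : PySem.Dict Int Int), d.keys.Nodup →
    l.foldl (fun d item =>
        if d.contains item.2 && decide (d.getD item.2 0 < min_sup) then d.erase item.2 else d) d
      = PySem.Dict.mk (d.items.filter
          (fun kv => !(decide (kv.1 ∈ l.map Prod.snd) && decide (kv.2 < min_sup)))) := by
  intro l
  induction l with
  | nil => intro d _; simp
  | cons a t ih =>
    intro d hnd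
    have hval : ∀ kv ∈ d.items, kv.1 = a.2 → d.getD a.2 0 = kv.2 := by
      intro kv hkv hk
      have hg : d.get? kv.1 = some kv.2 :=
        (PySem.Dict.get?_eq_some_iff_mem_items d kv.1 kv.2 hnd).mpr (by simpa using hkv)
      rw [PySem.Dict.getD_eq_get?_getD, ← hk, hg]; rfl
    simp only [List.foldl_cons]
    by_cases hc : d.contains a.2 && decide (d.getD a.2 0 < min_sup)
    · rw [if_pos hc]
      rw [ih (d.erase a.2) (nodup_keys_erase d a.2 hnd)]
      congr 1
      simp only [PySem.Dict.erase, List.filter_filter]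
      refine List.filter_congr ?_
      intro kv hkv
      by_cases hk : kv.1 = a.2
      · have h2 : kv.2 < min_sup := by
          have := hval kv hkv hk
          simp only [Bool.and_eq_true, decide_eq_true_eq] at hc
          omega
        simp [hk, h2]
      · by_cases hm : kv.1 ∈ List.map Prod.snd t <;> by_cases hlt : kv.2 < min_sup <;>
          simp [hk, hm, hlt, List.mem_cons]
    · rw [if_neg hc]
      rw [ih d hnd]
      congr 1
      refine List.filter_congr ?_
      intro kv hkv
      by_cases hk : kv.1 = a.2
      · have hcont : d.contains kv.1 = true := by
          simp only [PySem.Dict.contains]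
          exact List.any_eq_true.mpr ⟨kv, hkv, by simp⟩
        have h2 : ¬ kv.2 < min_sup := by
          have hv := hval kv hkv hk
          rw [hk] at hcont
          simp only [Bool.and_eq_true, decide_eq_true_eq, hcont, true_and] at hc
          omega
        simp [hk, h2]
      · by_cases hm : kv.1 ∈ List.map Prod.snd t <;> by_cases hlt : kv.2 < min_sup <;>
          simp [hk, hm, hlt, List.mem_cons]

-- B's first-occurrence insert loop appends (k, V k) for each NEW key of l passing P, in first-occurrence order
theorem build_loop (P : Int → Bool) (V : Int → Int) :
    ∀ (l : List Int) (d : PySem.Dict Int Int),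
    (l.foldl (fun (d : PySem.Dict Int Int) k =>
        if d.contains k = false && P k then d.insert k (V k) else d) d).items
      = d.items ++ ((PySem.Set.ofList l).filter (fun k => !d.contains k && P k)).map (fun k => (k, V k)) := by
  intro l
  induction l with
  | nil => intro d; simp [PySem.Set.ofList_nil]
  | cons a t ih =>
    intro d
    simp only [List.foldl_cons, PySem.Set.ofList_cons, List.filter_cons]
    cases hca : d.contains a with
    | false =>
      cases hpa : P a with
      | false =>
        -- key a is new but fails the support test: nothing inserted, a contributes nothing
        rw [if_neg (by simp), if_neg (by simp), ih d]
        congr 2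
        simp only [PySem.Set.discard, List.filter_filter]
        refine (List.filter_congr ?_).symm
        intro k _
        cases hka : (k == a) with
        | false => simp
        | true =>
          have : k = a := by simpa using hka
          subst this
          simp [hca, hpa]
      | true =>
        -- key a is new and kept: it is appended, and later occurrences of a are filtered out
        rw [if_pos (by simp), if_pos (by simp),
            ih (d.insert a (V a)),
            PySem.Dict.items_insert_of_not_contains (h := hca)]
        simp only [List.append_assoc, List.cons_append, List.nil_append, List.map_cons]
        congr 3
        simp only [PySem.Set.discard, List.filter_filter]
        refine List.filter_congr ?_
        intro k _
        rw [PySem.Dict.contains_insert]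
        cases hka : (k == a) <;> cases hck : d.contains k <;> simp
    | true =>
      -- key a already present: nothing inserted, a contributes nothing
      rw [if_neg (by simp), if_neg (by simp), ih d]
      congr 2
      simp only [PySem.Set.discard, List.filter_filter]
      refine (List.filter_congr ?_).symm
      intro k _
      cases hka : (k == a) with
      | false => simp
      | true =>
        have : k = a := by simpa using hka
        subst this
        simp [hca]

theorem attribute_count_eq : ∀ (data : List (Int × Int)) (min_sup : Int),
    attribute_count data min_sup = attribute_count_alt data min_sup := by
  intro data min_sup
  simp only [attribute_count, attribute_count_alt]
  have hsnd : (fun item : Int × Int => item.2) = Prod.snd := rfl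
  have hfst : (fun item : Int × Int => item.1) = Prod.fst := rfl
  rw [hsnd, hfst]
  -- A's if/else counting step is the get-default step
  have hstep : (fun (s : PySem.Set Int × PySem.Dict Int Int) (item : Int × Int) =>
      (PySem.Set.add s.1 item.1,
       if s.2.contains item.2 = false then s.2.insert item.2 1
       else s.2.insert item.2 (s.2.getD item.2 0 + 1)))
      = (fun (s : PySem.Set Int × PySem.Dict Int Int) item =>
      (PySem.Set.add s.1 item.1, s.2.insert item.2 (s.2.getD item.2 0 + 1))) := by
    funext s item
    rw [count_step_eq]
  rw [hstep]
  rw [PySem.List.foldl_prod_mk (fun (s : PySem.Set Int) (item : Int × Int) => PySem.Set.add s item.1)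
        (fun (d : PySem.Dict Int Int) (item : Int × Int) => d.insert item.2 (d.getD item.2 0 + 1)) data
        PySem.Set.empty PySem.Dict.empty]
  -- node_id: A's add-loop is set(map fst data)
  have hnode : data.foldl (fun (s : PySem.Set Int) (item : Int × Int) => PySem.Set.add s item.1)
      PySem.Set.empty = PySem.Set.ofList (data.map Prod.fst) := by
    rw [← PySem.Set.update_map_eq_foldl_add, PySem.Set.update_empty]
  -- A's count dict is counter(keys)
  have hcnt : data.foldl (fun (d : PySem.Dict Int Int) (item : Int × Int) =>
      d.insert item.2 (d.getD item.2 0 + 1)) PySem.Dict.empty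
      = PySem.Dict.counter (data.map Prod.snd) := by
    rw [← PySem.Dict.foldl_insert_getD_add_one_eq_counter, List.foldl_map]
  rw [hnode, hcnt]
  -- the erased dict's items are the ≥ min_sup filter of the count table
  have hitems : (data.foldl (fun d (item : Int × Int) =>
      if d.contains item.2 && decide (d.getD item.2 0 < min_sup) then d.erase item.2 else d)
      (PySem.Dict.counter (data.map Prod.snd))).items
      = (PySem.Dict.counter (data.map Prod.snd)).items.filter (fun kv => decide (min_sup ≤ kv.2)) := by
    rw [erase_loop min_sup data _ (PySem.Dict.nodup_keys_counter _)]
    refine List.filter_congr ?_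
    intro kv hkv
    have hmem : kv.1 ∈ data.map Prod.snd := by
      have h1 := PySem.Dict.mem_keys_of_mem_items _ hkv
      rw [PySem.Dict.keys_counter] at h1
      exact (PySem.Set.mem_ofList _ _).mp h1
    simp only [hmem, decide_true, Bool.true_and]
    simp only [← decide_not, decide_eq_decide]
    omega
  -- the surviving pairs, as A computes them and as B computes them
  have hkept : (PySem.Dict.counter (data.map Prod.snd)).items.filter (fun kv => decide (min_sup ≤ kv.2))
      = ((PySem.Set.ofList (data.map Prod.snd)).filter
          (fun k => decide (min_sup ≤ ((data.map Prod.snd).count k : Int)))).map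
          (fun k => (k, ((data.map Prod.snd).count k : Int))) := by
    rw [PySem.Dict.items_counter]
    rw [List.filter_map]
    rfl
  -- B's insert loop builds exactly those pairs
  have hB : ((data.map Prod.snd).foldl (fun (d : PySem.Dict Int Int) k =>
      if d.contains k = false && decide (min_sup ≤ ((data.map Prod.snd).count k : Int))
      then d.insert k ((data.map Prod.snd).count k : Int) else d) PySem.Dict.empty).items
      = ((PySem.Set.ofList (data.map Prod.snd)).filter
          (fun k => decide (min_sup ≤ ((data.map Prod.snd).count k : Int)))).map
          (fun k => (k, ((data.map Prod.snd).count k : Int))) := by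
    rw [build_loop]
    simp [PySem.Dict.contains_empty]
    rfl
  -- the third loop is a filter over data; its membership test is the count test
  simp only [hB]
  simp only [PySem.Dict.contains] at hitems ⊢
  simp only [hitems, hkept]
  rw [PySem.List.foldl_append_if (fun item : Int × Int =>
        (((PySem.Set.ofList (data.map Prod.snd)).filter
            (fun k => decide (min_sup ≤ ((data.map Prod.snd).count k : Int)))).map
            (fun k => (k, ((data.map Prod.snd).count k : Int)))).any
          (fun p => p.1 == item.2)) (fun x => x) data [], List.nil_append, List.map_id']
  have hds : data.filter (fun item : Int × Int =>
        (((PySem.Set.ofList (data.map Prod.snd)).filter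
            (fun k => decide (min_sup ≤ ((data.map Prod.snd).count k : Int)))).map
            (fun k => (k, ((data.map Prod.snd).count k : Int)))).any
          (fun p => p.1 == item.2))
      = data.filter (fun item => decide (min_sup ≤ ((data.map Prod.snd).count item.2 : Int))) := by
    refine List.filter_congr ?_
    intro item hitem
    have hmem : item.2 ∈ data.map Prod.snd := List.mem_map_of_mem hitem
    simp only [List.any_map, List.any_filter]
    by_cases hp : min_sup ≤ ((data.map Prod.snd).count item.2 : Int)
    · simp only [decide_eq_true hp]
      refine List.any_eq_true.mpr ⟨item.2, (PySem.Set.mem_ofList _ _).mpr hmem, ?_⟩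
      simp [hp]
    · simp only [decide_eq_false hp]
      rw [List.any_eq_false]
      intro k hk
      simp only [Function.comp_apply, Bool.and_eq_true, not_and]
      intro h1 h2
      have : k = item.2 := by simpa using h2
      subst this
      exact absurd (by simpa using h1) hp
  rw [hds]

-- ===== VERDICT (by name: the statement is the Claim_ definition above) =====
theorem attribute_count_spec : Claim_equal_attribute_count := by
  intro data min_sup _
  unfold Spec_attribute_count
  exact attribute_count_eq data min_sup
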